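-- pv_equiv track=rewrite | github.com/Elisa-Correa/ayed1-2025-tps | TP3/ejercicio1.py | es_simetrica_diagonal_secundaria
-- ===== SOURCE A (Python) =====
-- def es_cuadrada(cant_filas: int, cant_columnas: int) -> bool:
--     """
--     Esta función verifica que una matriz tenga la misma cantidad de filas como columnas,
--     si es asi la matriz es cuadrada
--
--     Pre:
--         - Recibe la cantidad de filas y columnas que componen la matriz
--         - Deben ser números enteros positivos
--
--     Post:
--         - Retorna True en caso de ser cuadrada
--         _ Retorna False en caso contrario.
--
--     """
--
--     if cant_filas != cant_columnas:
--         return False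
--     return True
--
-- def es_simetrica_diagonal_secundaria(matriz: list[list[int]]) -> bool:
--     """
--     Pre:
--         - Recibe una matriz, lista de listas de numeros enteros
--
--     Post:
--         - Devuelve True si la matriz es cuadrada y A[i][j] == A[N-1-j][N-1-i].
--         - Devuelve False en caso contrario.
--     """
--
--     cant_filas = len(matriz)
--     cant_columnas = len(matriz[0])
--
--     if not es_cuadrada(cant_filas, cant_columnas):
--         return False
--
--     for i in range(cant_filas):
--         for j in range(cant_filas):
--
--             if matriz[i][j] != matriz[cant_filas - 1 - j][cant_filas - 1 - i]:
--                 return False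
--
--     return True
-- ===== SOURCE B (Python) =====
-- def es_simetrica_diagonal_secundaria(matriz: list[list[int]]) -> bool:
--     n = len(matriz)
--     if n != len(matriz[0]):
--         return False
--     anti = [list(col) for col in zip(*[list(reversed(fila)) for fila in reversed(matriz)])]
--     return anti == matriz
-- ===== Notes on version B (the rewrite author's own statement) =====
-- stated objective: idiomatic
-- what changed: Instead of a short-circuiting double index loop comparing A[i][j] with A[n-1-j][n-1-i], B materializes the anti-transpose (rotate the matrix 180 degrees and transpose with zip) and returns one whole-structure equality test against the original.
-- outside the precondition, e.g. on es_simetrica_diagonal_secundaria([]): A raises IndexError, B raises IndexError; on es_simetrica_diagonal_secundaria([[1, 2], [2, 1, 9]]): A returns True, B returns False; on es_simetrica_diagonal_secundaria([[1, 2], [2]]): A raises IndexError, B returns False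
import Mathlib
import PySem

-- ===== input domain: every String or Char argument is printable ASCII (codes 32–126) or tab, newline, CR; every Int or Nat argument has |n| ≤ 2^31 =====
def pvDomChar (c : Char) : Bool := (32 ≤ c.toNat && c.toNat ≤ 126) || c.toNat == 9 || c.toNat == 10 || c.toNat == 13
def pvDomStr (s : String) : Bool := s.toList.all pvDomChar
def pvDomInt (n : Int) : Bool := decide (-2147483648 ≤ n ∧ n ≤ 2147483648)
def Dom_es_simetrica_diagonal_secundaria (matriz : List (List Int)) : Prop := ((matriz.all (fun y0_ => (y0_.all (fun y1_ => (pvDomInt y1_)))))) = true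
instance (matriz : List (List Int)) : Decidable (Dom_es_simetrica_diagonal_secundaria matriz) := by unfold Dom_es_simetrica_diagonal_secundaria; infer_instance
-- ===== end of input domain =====

-- B replaces the element-by-element double loop by building the 180°-rotated transpose and
-- comparing whole structures (idiomatic zip-based anti-transpose); not faster, just plainer.

-- ===== PORT A =====
def es_cuadrada (cant_filas cant_columnas : Int) : Bool :=
  if cant_filas ≠ cant_columnas then false else true

def es_simetrica_diagonal_secundaria (matriz : List (List Int)) : Bool :=
  let cant_filas : Int := matriz.length
  let cant_columnas : Int := (((PySem.List.pyGet? matriz 0).getD []).length : Int)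
  if !(es_cuadrada cant_filas cant_columnas) then false
  else
    (PySem.List.pyRange 0 cant_filas 1).all (fun i =>
      (PySem.List.pyRange 0 cant_filas 1).all (fun j =>
        (PySem.List.pyGet? ((PySem.List.pyGet? matriz i).getD []) j).getD 0
          == (PySem.List.pyGet? ((PySem.List.pyGet? matriz (cant_filas - 1 - j)).getD []) (cant_filas - 1 - i)).getD 0))

-- ===== PORT B =====
-- termination helpers for the zip(*rows) transliteration (cited by decreasing_by)
theorem pvSumTailLe (rows : List (List Int)) :
    ((rows.map List.tail).map List.length).sum ≤ (rows.map List.length).sum := by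
  induction rows with
  | nil => simp
  | cons r rs ih =>
      simp only [List.map_cons, List.sum_cons]
      have : r.tail.length ≤ r.length := by simp [List.length_tail]
      omega

theorem pvSumTailLt (rows : List (List Int)) (h1 : rows ≠ []) (h2 : ∀ r ∈ rows, r ≠ []) :
    ((rows.map List.tail).map List.length).sum < (rows.map List.length).sum := by
  cases rows with
  | nil => exact absurd rfl h1
  | cons r rs =>
      have hr : r ≠ [] := h2 r (by simp)
      have hlt : r.tail.length < r.length := by
        cases r with
        | nil => exact absurd rfl hr
        | cons a t => simp
      have := pvSumTailLe rs
      simp only [List.map_cons, List.sum_cons]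
      omega

-- exact transliteration of Python's zip(*rows) for lists of int lists: stop at the shortest row
def pyZipStar (rows : List (List Int)) : List (List Int) :=
  if h : rows.isEmpty || rows.any (·.isEmpty) then []
  else (rows.map List.headI) :: pyZipStar (rows.map List.tail)
termination_by ((rows.map List.length).sum)
decreasing_by
  simp only [Bool.or_eq_true, List.isEmpty_iff, List.any_eq_true, not_or, not_exists] at h
  have hlt := pvSumTailLt rows h.1 (fun r hr => by
    have := h.2; simp at this; exact List.isEmpty_eq_false_iff.mp (by simpa using this r hr))
  simpa using hlt

def es_simetrica_diagonal_secundaria_alt (matriz : List (List Int)) : Bool :=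
  let n : Int := matriz.length
  if n ≠ (((PySem.List.pyGet? matriz 0).getD []).length : Int) then false
  else
    let anti := pyZipStar ((matriz.reverse).map List.reverse)
    anti == matriz

-- ===== PRECONDITION & SPEC =====
-- Pre_ excludes the empty matrix and square-looking ragged matrices (first-row length equal
-- to the row count but some other row of a different length): there A raises IndexError on a
-- short row and, on a longer row, silently ignores the trailing elements — an accident of its
-- index-bounded loop that a whole-structure comparison defensibly rejects.
def Pre_es_simetrica_diagonal_secundaria (matriz : List (List Int)) : Prop :=
  matriz ≠ [] ∧ (matriz.headI.length = matriz.length → ∀ row ∈ matriz, row.length = matriz.length)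
instance (matriz : List (List Int)) : Decidable (Pre_es_simetrica_diagonal_secundaria matriz) := by
  unfold Pre_es_simetrica_diagonal_secundaria; infer_instance

def pvWitness_es_simetrica_diagonal_secundaria : List (List Int) := [[1, 2], [2, 1]]

def Spec_es_simetrica_diagonal_secundaria (matriz : List (List Int)) (out : Bool) : Prop := out = es_simetrica_diagonal_secundaria_alt matriz
instance (matriz : List (List Int)) (out : Bool) : Decidable (Spec_es_simetrica_diagonal_secundaria matriz out) := by unfold Spec_es_simetrica_diagonal_secundaria; infer_instance

-- ===== CLAIM (what is proved, stated in full; the proofs are below) =====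
def Claim_equal_es_simetrica_diagonal_secundaria : Prop := ∀ (matriz : List (List Int)), Dom_es_simetrica_diagonal_secundaria matriz → Pre_es_simetrica_diagonal_secundaria matriz → Spec_es_simetrica_diagonal_secundaria matriz (es_simetrica_diagonal_secundaria matriz)

-- ===== LEMMAS AND PROOFS =====

-- pointwise symmetry-about-the-secondary-diagonal condition both ports are reduced to
def SymmP (m : List (List Int)) (n : Nat) : Prop :=
  ∀ i < n, ∀ j < n, (m.getD i []).getD j 0 = (m.getD (n - 1 - j) []).getD (n - 1 - i) 0

theorem acc_eq (m : List (List Int)) (i j : Nat) :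
    (PySem.List.pyGet? ((PySem.List.pyGet? m (i : Int)).getD []) (j : Int)).getD 0
      = (m.getD i []).getD j 0 := by
  simp [PySem.List.pyGet?_natCast, List.getD_eq_getElem?_getD]

theorem pyGet_zero (m : List (List Int)) (hm : m ≠ []) :
    (PySem.List.pyGet? m 0).getD [] = m.headI := by
  cases m with
  | nil => exact absurd rfl hm
  | cons a t =>
      rw [show (0 : Int) = ((0 : Nat) : Int) from rfl, PySem.List.pyGet?_natCast]
      simp

theorem headI_mem (m : List (List Int)) (hm : m ≠ []) : m.headI ∈ m := by
  cases m with
  | nil => exact absurd rfl hm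
  | cons a t => simp

theorem A_true_iff (m : List (List Int)) (n : Nat) (hm : m ≠ []) (hlen : m.length = n)
    (hrows : ∀ r ∈ m, r.length = n) :
    es_simetrica_diagonal_secundaria m = true ↔ SymmP m n := by
  have h0 := pyGet_zero m hm
  have hhead : m.headI.length = n := hrows _ (headI_mem m hm)
  unfold es_simetrica_diagonal_secundaria
  simp only [h0, hlen, hhead, es_cuadrada, ne_eq, not_true_eq_false, if_false,
    Bool.not_eq_eq_eq_not]
  rw [if_neg (by simp)]
  unfold SymmP
  simp only [PySem.List.pyRange_one, sub_zero, Int.toNat_natCast, zero_add, List.all_map,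
    List.all_eq_true, List.mem_range, beq_iff_eq, Function.comp]
  constructor
  · intro h i hi j hj
    have := h i hi j hj
    rw [show ((n:Int) - 1 - (j:Int)) = ((n - 1 - j : Nat) : Int) from by omega,
        show ((n:Int) - 1 - (i:Int)) = ((n - 1 - i : Nat) : Int) from by omega,
        acc_eq, acc_eq] at this
    exact this
  · intro h i hi j hj
    rw [show ((n:Int) - 1 - (j:Int)) = ((n - 1 - j : Nat) : Int) from by omega,
        show ((n:Int) - 1 - (i:Int)) = ((n - 1 - i : Nat) : Int) from by omega,
        acc_eq, acc_eq]
    exact h i hi j hj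

theorem headI_eq_getD (r : List Int) (hr : r ≠ []) : r.headI = r.getD 0 0 := by
  cases r with
  | nil => exact absurd rfl hr
  | cons a t => simp

theorem tail_getD (r : List Int) (i : Nat) : r.tail.getD i 0 = r.getD (i + 1) 0 := by
  cases r <;> simp [List.getD]

theorem zipStar_eq (k : Nat) : ∀ rows : List (List Int), rows ≠ [] →
    (∀ r ∈ rows, r.length = k) →
    pyZipStar rows = (List.range k).map (fun i => rows.map (fun r => r.getD i 0)) := by
  induction k with
  | zero =>
      intro rows h1 h2
      rw [pyZipStar, dif_pos]
      · simp
      · cases rows with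
        | nil => exact absurd rfl h1
        | cons r rs =>
            have : r = [] := List.length_eq_zero_iff.mp (h2 r (by simp))
            simp [this]
  | succ k ih =>
      intro rows h1 h2
      have hne : ∀ r ∈ rows, r ≠ [] := by
        intro r hr h
        have := h2 r hr
        simp [h] at this
      rw [pyZipStar, dif_neg]
      · have h1' : rows.map List.tail ≠ [] := by simpa using h1
        have h2' : ∀ r ∈ rows.map List.tail, r.length = k := by
          intro r hr
          simp only [List.mem_map] at hr
          obtain ⟨s, hs, rfl⟩ := hr
          have := h2 s hs
          simp [List.length_tail, this]
        rw [ih _ h1' h2', List.range_succ_eq_map]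
        simp only [List.map_cons, List.map_map]
        congr 1
        · exact List.map_congr_left fun r hr => headI_eq_getD r (hne r hr)
        · apply List.map_congr_left
          intro i _
          simp only [Function.comp]
          exact List.map_congr_left fun r _ => tail_getD r i
      · intro hcond
        simp only [Bool.or_eq_true, List.isEmpty_iff, List.any_eq_true] at hcond
        rcases hcond with h | ⟨r, hr, hre⟩
        · exact h1 h
        · exact hne r hr (by simpa using hre)

theorem getD_map_lt {α β : Type} (l : List α) (f : α → β) (d : α) (d' : β) (i : Nat)
    (hi : i < l.length) : (l.map f).getD i d' = f (l.getD i d) := by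
  rw [List.getD_eq_getElem _ _ (by simpa using hi), List.getElem_map,
      List.getD_eq_getElem _ _ hi]

theorem getD_reverse_row (r : List Int) (n j : Nat) (hr : r.length = n) (hj : j < n) :
    r.reverse.getD j 0 = r.getD (n - 1 - j) 0 := by
  rw [List.getD_eq_getElem _ _ (by simp [hr]; omega), List.getElem_reverse,
      List.getD_eq_getElem _ _ (by omega)]
  congr 1
  omega

theorem getD_reverse_rows (m : List (List Int)) (n i : Nat) (hlen : m.length = n)
    (hi : i < n) : m.reverse.getD i [] = m.getD (n - 1 - i) [] := by
  rw [List.getD_eq_getElem _ _ (by simp; omega), List.getElem_reverse,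
      List.getD_eq_getElem _ _ (by omega)]
  congr 1
  omega

-- anti-transpose column i, entry j, in getD form
theorem anti_entry (m : List (List Int)) (n : Nat) (hlen : m.length = n)
    (hrows : ∀ r ∈ m, r.length = n) (j i : Nat) (hj : j < n) (hi : i < n) :
    ((m.reverse.map List.reverse).map (fun r => r.getD j 0)).getD i 0
      = (m.getD (n - 1 - i) []).getD (n - 1 - j) 0 := by
  have hi' : i < (m.reverse.map List.reverse).length := by simp; omega
  rw [getD_map_lt _ _ [] 0 i hi',
      getD_map_lt m.reverse List.reverse [] [] i (by simp; omega),
      getD_reverse_rows m n i hlen hi]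
  have hmem : m.getD (n - 1 - i) [] ∈ m := by
    rw [List.getD_eq_getElem _ _ (by omega)]
    exact List.getElem_mem _
  exact getD_reverse_row _ n j (hrows _ hmem) hj

theorem B_true_iff (m : List (List Int)) (n : Nat) (hm : m ≠ []) (hlen : m.length = n)
    (hrows : ∀ r ∈ m, r.length = n) :
    es_simetrica_diagonal_secundaria_alt m = true ↔ SymmP m n := by
  have h0 := pyGet_zero m hm
  have hhead : m.headI.length = n := hrows _ (headI_mem m hm)
  unfold es_simetrica_diagonal_secundaria_alt
  simp only [h0, hlen, hhead]
  rw [if_neg (by simp)]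
  have hne' : m.reverse.map List.reverse ≠ [] := by simp [hm]
  have hrows' : ∀ r ∈ m.reverse.map List.reverse, r.length = n := by
    intro r hr
    simp only [List.mem_map, List.mem_reverse] at hr
    obtain ⟨s, hs, rfl⟩ := hr
    simp [hrows s hs]
  rw [zipStar_eq n _ hne' hrows', beq_iff_eq]
  unfold SymmP
  constructor
  · intro heq i hi j hj
    have h1 : m.getD i []
        = (m.reverse.map List.reverse).map (fun r => r.getD i 0) := by
      conv_lhs => rw [← heq]
      rw [getD_map_lt (List.range n) _ 0 [] i (by simpa using hi)]
      congr 1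
      rw [List.getD_eq_getElem _ _ (by simpa using hi)]
      simp
    rw [h1]
    exact anti_entry m n hlen hrows i j hi hj
  · intro hs
    apply List.ext_getElem (by simp [hlen])
    intro j hj1 hj2
    have hj : j < n := by omega
    have e1 : ((List.range n).map
        (fun c => (m.reverse.map List.reverse).map (fun r => r.getD c 0)))[j]'hj1
        = (m.reverse.map List.reverse).map (fun r => r.getD j 0) := by
      rw [List.getElem_map]
      congr 1
      simp
    rw [e1]
    have hjlen : (m[j]'hj2).length = n := hrows _ (List.getElem_mem _)
    apply List.ext_getElem (by simp [hlen, hjlen])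
    intro i hi1 hi2
    have hi : i < n := by omega
    rw [← List.getD_eq_getElem _ 0 hi1, anti_entry m n hlen hrows j i hj hi,
        ← hs j hj i hi, List.getD_eq_getElem m [] hj2,
        List.getD_eq_getElem _ 0 (by omega)]

-- ===== VERDICT (by name: the statement is the Claim_ definition above) =====
theorem es_simetrica_diagonal_secundaria_spec : Claim_equal_es_simetrica_diagonal_secundaria := by
  intro m _ hpre
  obtain ⟨hm, hsq⟩ := hpre
  unfold Spec_es_simetrica_diagonal_secundaria
  by_cases hs : m.headI.length = m.length
  · have hrows := hsq hs
    have hA := A_true_iff m m.length hm rfl hrows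
    have hB := B_true_iff m m.length hm rfl hrows
    cases hA' : es_simetrica_diagonal_secundaria m <;>
      cases hB' : es_simetrica_diagonal_secundaria_alt m <;> simp_all
  · have h0 := pyGet_zero m hm
    have hx : (m.length : Int) ≠ (m.headI.length : Int) := by
      intro h
      exact hs (by exact_mod_cast h.symm)
    unfold es_simetrica_diagonal_secundaria es_simetrica_diagonal_secundaria_alt
    simp [es_cuadrada, h0, hx]
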